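-- pv_equiv track=rewrite | github.com/TrellixVulnTeam/infra_RPUR | appengine/findit/waterfall/flake/recursive_flake_pipeline.py | _GetListOfNearbyBuildNumbers
-- ===== SOURCE A (Python) =====
-- def _GetListOfNearbyBuildNumbers(preferred_run_build_number, maximum_threshold):
--   """Gets a list of numbers within range near preferred_run_build_number.
--
--   Args:
--     preferred_run_build_number (int): Assumed to be a positive number.
--     maximum_threshold (int): A non-negative number for how far in either
--     direction to look.
--
--   Returns:
--     A list of nearby numbers within maximum_threshold before and after
--     preferred_run_build_number, ordered by closest to farthest. For example, if
--     preferred_run_build_number is 1000 and maximum_threshold is 2, return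
--     [1000, 999, 1001, 998, 1002].
--   """
--   if maximum_threshold >= preferred_run_build_number:
--     # Build numbers are always assumed to start from 1, so don't include
--     # anything before that.
--     return range(1, preferred_run_build_number + maximum_threshold + 1)
--
--   nearby_build_numbers = [preferred_run_build_number]
--
--   for i in range(1, maximum_threshold + 1):
--     nearby_build_numbers.append(preferred_run_build_number - i)
--     nearby_build_numbers.append(preferred_run_build_number + i)
--
--   return nearby_build_numbers
-- ===== SOURCE B (Python) =====
-- def _GetListOfNearbyBuildNumbers(preferred_run_build_number, maximum_threshold):
--   """Nearby build numbers ordered by closeness, computed by sorting the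
--   candidate window with a distance key instead of alternate appends."""
--   if maximum_threshold >= preferred_run_build_number:
--     return range(1, preferred_run_build_number + maximum_threshold + 1)
--   candidates = range(preferred_run_build_number - maximum_threshold,
--                      preferred_run_build_number + maximum_threshold + 1)
--   # key: doubled distance, +1 on the after side, so each 'before' number
--   # precedes its equally-distant 'after' twin.
--   return sorted(candidates,
--                 key=lambda n: 2 * abs(n - preferred_run_build_number)
--                 + (n > preferred_run_build_number))
-- ===== Notes on version B (the rewrite author's own statement) =====
-- stated objective: alternative
-- what changed: B computes the closeness ordering by sorting the candidate window range with a distance key (doubled distance, +1 on the after side) instead of alternately appending before/after offsets in a loop.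
-- outside the precondition, e.g. on _GetListOfNearbyBuildNumbers(10, -3): A returns [10], B returns []
import Mathlib
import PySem

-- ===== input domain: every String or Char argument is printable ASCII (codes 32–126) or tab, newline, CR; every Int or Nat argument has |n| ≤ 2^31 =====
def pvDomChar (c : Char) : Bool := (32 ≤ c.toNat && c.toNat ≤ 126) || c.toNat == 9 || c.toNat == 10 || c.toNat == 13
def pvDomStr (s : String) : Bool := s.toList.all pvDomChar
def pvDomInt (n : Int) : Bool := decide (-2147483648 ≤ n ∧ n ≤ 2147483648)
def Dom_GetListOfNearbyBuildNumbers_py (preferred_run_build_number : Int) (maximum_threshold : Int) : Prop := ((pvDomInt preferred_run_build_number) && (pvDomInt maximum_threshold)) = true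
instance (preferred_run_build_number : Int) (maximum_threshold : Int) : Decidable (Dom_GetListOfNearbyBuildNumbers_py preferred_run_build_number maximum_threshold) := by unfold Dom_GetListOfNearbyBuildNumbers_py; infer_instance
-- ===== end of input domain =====

-- B replaces the alternate-append loop by sorting the candidate window with a distance key (alternative, not faster).

-- ===== PORT A =====
def GetListOfNearbyBuildNumbers_py (preferred_run_build_number : Int) (maximum_threshold : Int) : List Int :=
  if maximum_threshold ≥ preferred_run_build_number then
    PySem.List.pyRange 1 (preferred_run_build_number + maximum_threshold + 1) 1
  else
    (PySem.List.pyRange 1 (maximum_threshold + 1) 1).foldl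
      (fun acc i => acc ++ [preferred_run_build_number - i, preferred_run_build_number + i])
      [preferred_run_build_number]

-- ===== PORT B =====
def GetListOfNearbyBuildNumbers_py_alt (preferred_run_build_number : Int) (maximum_threshold : Int) : List Int :=
  if maximum_threshold ≥ preferred_run_build_number then
    PySem.List.pyRange 1 (preferred_run_build_number + maximum_threshold + 1) 1
  else
    PySem.List.sorted
      (PySem.List.pyRange (preferred_run_build_number - maximum_threshold)
                          (preferred_run_build_number + maximum_threshold + 1) 1)
      (fun n => 2 * |n - preferred_run_build_number| +
                (if preferred_run_build_number < n then 1 else 0)) false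

-- ===== PRECONDITION & SPEC =====
-- Pre_ excludes negative maximum_threshold with maximum_threshold < preferred_run_build_number
-- (outside the documented non-negative-threshold domain), where A's singleton [preferred] is an
-- artefact of its loop not running and B's empty window is an equally defensible value.
def Pre_GetListOfNearbyBuildNumbers_py (preferred_run_build_number : Int) (maximum_threshold : Int) : Prop :=
  0 ≤ maximum_threshold ∨ preferred_run_build_number ≤ maximum_threshold
instance (preferred_run_build_number : Int) (maximum_threshold : Int) : Decidable (Pre_GetListOfNearbyBuildNumbers_py preferred_run_build_number maximum_threshold) := by unfold Pre_GetListOfNearbyBuildNumbers_py; infer_instance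

def pvWitness_GetListOfNearbyBuildNumbers_py : Int × Int := (5, 2)

def Spec_GetListOfNearbyBuildNumbers_py (preferred_run_build_number : Int) (maximum_threshold : Int) (out : List Int) : Prop := out = GetListOfNearbyBuildNumbers_py_alt preferred_run_build_number maximum_threshold
instance (preferred_run_build_number : Int) (maximum_threshold : Int) (out : List Int) : Decidable (Spec_GetListOfNearbyBuildNumbers_py preferred_run_build_number maximum_threshold out) := by unfold Spec_GetListOfNearbyBuildNumbers_py; infer_instance

-- ===== CLAIM (what is proved, stated in full; the proofs are below) =====
def Claim_equal_GetListOfNearbyBuildNumbers_py : Prop := ∀ (preferred_run_build_number : Int) (maximum_threshold : Int), Dom_GetListOfNearbyBuildNumbers_py preferred_run_build_number maximum_threshold → Pre_GetListOfNearbyBuildNumbers_py preferred_run_build_number maximum_threshold → Spec_GetListOfNearbyBuildNumbers_py preferred_run_build_number maximum_threshold (GetListOfNearbyBuildNumbers_py preferred_run_build_number maximum_threshold)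

-- ===== LEMMAS AND PROOFS =====

-- reference interleaved list [p, p-1, p+1, …, p-k, p+k]
def pvRef (p : Int) (k : Nat) : List Int :=
  p :: ((List.range k).map (fun j : Nat => 1 + (j : Int))).flatMap (fun i => [p - i, p + i])

def pvKey (p : Int) (n : Int) : Int := 2 * |n - p| + (if p < n then 1 else 0)

theorem pvRef_succ (p : Int) (k : Nat) :
    pvRef p (k + 1) = pvRef p k ++ [p - (1 + (k : Int)), p + (1 + (k : Int))] := by
  simp [pvRef, List.range_succ]

theorem pvKey_mem (p : Int) (k : Nat) (x : Int) (hx : x ∈ pvRef p k) :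
    pvKey p x ≤ 2 * k + 1 := by
  induction k with
  | zero =>
    simp [pvRef] at hx
    subst hx; simp [pvKey]
  | succ k ih =>
    rw [pvRef_succ] at hx
    rcases List.mem_append.mp hx with h | h
    · have := ih h; omega
    · simp at h
      rcases h with h | h <;> subst h <;>
        simp [pvKey, abs_of_nonpos, abs_of_nonneg, show (0:Int) ≤ 1 + (k:Int) by positivity] <;>
        omega

theorem pvRef_pairwise (p : Int) (k : Nat) :
    (pvRef p k).Pairwise (fun a b => pvKey p a < pvKey p b) := by
  induction k with
  | zero => simp [pvRef]
  | succ k ih =>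
    rw [pvRef_succ]
    rw [List.pairwise_append]
    refine ⟨ih, ?_, ?_⟩
    · constructor
      · intro b hb; simp at hb; subst hb
        simp [pvKey, abs_of_nonpos, abs_of_nonneg, show (0:Int) ≤ 1 + (k:Int) by positivity]
        omega
      · simp
    · intro x hx y hy
      have hkx := pvKey_mem p k x hx
      have hky : 2 * ((k : Int) + 1) ≤ pvKey p y := by
        simp at hy
        rcases hy with h | h <;> subst h <;>
          simp [pvKey, abs_of_nonpos, abs_of_nonneg, show (0:Int) ≤ 1 + (k:Int) by positivity] <;>
          omega
      push_cast at hkx hky ⊢; omega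

theorem pvRef_perm (p : Int) (k : Nat) :
    (pvRef p k).Perm (PySem.List.pyRange (p - (k : Int)) (p + (k : Int) + 1) 1) := by
  induction k with
  | zero =>
    rw [show p + ((0 : Nat) : Int) + 1 = p + 1 by push_cast; ring,
        show p - ((0 : Nat) : Int) = p by push_cast; ring,
        PySem.List.pyRange_one_singleton]
    simp [pvRef]
  | succ k ih =>
    have h1 : p - ((k + 1 : Nat) : Int) < p + ((k + 1 : Nat) : Int) + 1 := by push_cast; omega
    rw [PySem.List.pyRange_one_cons h1]
    rw [show p - ((k + 1 : Nat) : Int) + 1 = p - (k : Int) by push_cast; ring,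
        show p + ((k + 1 : Nat) : Int) + 1 = (p + (k : Int) + 1) + 1 by push_cast; ring,
        PySem.List.pyRange_one_succ_right (by omega)]
    rw [pvRef_succ,
        show p - (1 + (k : Int)) = p - ((k + 1 : Nat) : Int) by push_cast; ring,
        show p + (1 + (k : Int)) = p + (k : Int) + 1 by ring]
    refine List.Perm.trans (ih.append_right _) ?_
    refine List.Perm.trans List.perm_append_comm ?_
    exact List.Perm.cons _ List.perm_append_comm

-- A's loop equals the reference list
theorem pvA_eq (p mt : Int) (h : 0 ≤ mt) :
    (PySem.List.pyRange 1 (mt + 1) 1).foldl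
      (fun acc i => acc ++ [p - i, p + i]) [p] = pvRef p mt.toNat := by
  rw [PySem.List.foldl_append_eq_flatMap]
  rw [PySem.List.pyRange_one]
  have : (mt + 1 - 1).toNat = mt.toNat := by omega
  rw [this]
  simp only [pvRef, List.singleton_append]

-- B's sort equals the reference list
theorem pvB_eq (p mt : Int) (h : 0 ≤ mt) :
    PySem.List.sorted (PySem.List.pyRange (p - mt) (p + mt + 1) 1)
      (fun n => 2 * |n - p| + (if p < n then 1 else 0)) false = pvRef p mt.toNat := by
  have hmt : ((mt.toNat : Int)) = mt := Int.toNat_of_nonneg h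
  have hperm : (pvRef p mt.toNat).Perm
      (PySem.List.pyRange (p - mt) (p + mt + 1) 1) := by
    rw [← hmt]; exact pvRef_perm p mt.toNat
  exact PySem.List.sorted_eq_of_perm_of_pairwise_lt _ _ _ hperm (pvRef_pairwise p mt.toNat)

-- ===== VERDICT (by name: the statement is the Claim_ definition above) =====
theorem GetListOfNearbyBuildNumbers_py_spec : Claim_equal_GetListOfNearbyBuildNumbers_py := by
  intro p mt _ hpre
  unfold Spec_GetListOfNearbyBuildNumbers_py
  unfold GetListOfNearbyBuildNumbers_py GetListOfNearbyBuildNumbers_py_alt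
  by_cases hge : mt ≥ p
  · simp [hge]
  · simp only [if_neg hge]
    have h0 : 0 ≤ mt := by
      rcases hpre with h | h
      · exact h
      · exact absurd h hge
    rw [pvA_eq p mt h0, pvB_eq p mt h0]
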